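-- pv_equiv track=rewrite | github.com/renaissance-codes/leetcode | out/production/leetcode/src/leetcode/python3/leetcode488.py | findMinStep
-- ===== SOURCE A (Python) =====
-- import copy
--
-- def findMinStep(board: str, hand: str) -> int:
--     maxint = 1 << 32
--     hm = dict()
--     for h in hand:
--         hm[h] = hm.get(h, 0) + 1
--
--     boardlist = []
--     d = 1
--     last = None
--     for x in board:
--         if last == None:
--             last = x
--         elif last == x:
--             d += 1
--         else:
--             boardlist.append((last, d))
--             last = x
--             d = 1
--     boardlist.append((last, d))
--
--     def dfs(bd, hm, p=0):
--         if len(bd) == 0: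
--             return p
--         minx = maxint
--         for i, w in enumerate(bd):
--             if w[0] in hm and hm[w[0]] + w[1] >= 3:
--
--                 remain = bd[:i] + bd[i + 1:]
--                 si = i - 1
--                 sj = i + 1
--
--                 while si >= 0 and sj < len(bd) and bd[si][0] == bd[sj][0] and bd[si][1] + bd[sj][1] >= 3:
--                     si -= 1
--                     sj += 1
--
--                 if si >= 0 and sj < len(bd) and bd[si][0] == bd[sj][0]:
--                     remain = bd[:si] + [(bd[si][0], bd[si][1] + bd[sj][1])] + bd[sj + 1:]
--                 else:
--                     remain = bd[:max(si + 1, 0)] + bd[sj:]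
--                 chm = copy.deepcopy(hm)
--                 chm[w[0]] -= 3 - w[1]
--                 res = dfs(remain, chm, p + 3 - w[1])
--
--                 if res < minx:
--                     minx = res
--         return minx
--
--     ans = dfs(boardlist, hm, 0)
--     return -1 if ans == maxint else ans
-- ===== SOURCE B (Python) =====
-- def findMinStep(board: str, hand: str) -> int:
--     hm = {}
--     for h in hand:
--         hm[h] = hm.get(h, 0) + 1
--
--     runs = []
--     i = 0
--     while i < len(board):
--         j = i
--         while j < len(board) and board[j] == board[i]:
--             j += 1
--         runs.append((board[i], j - i))
--         i = j
--     runs = tuple(runs)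
--
--     memo = {}
--
--     def collapse(bd, i):
--         si, sj = i - 1, i + 1
--         while si >= 0 and sj < len(bd) and bd[si][0] == bd[sj][0] and bd[si][1] + bd[sj][1] >= 3:
--             si -= 1
--             sj += 1
--         if si >= 0 and sj < len(bd) and bd[si][0] == bd[sj][0]:
--             return bd[:si] + ((bd[si][0], bd[si][1] + bd[sj][1]),) + bd[sj + 1:]
--         return bd[:max(si + 1, 0)] + bd[sj:]
--
--     def solve(bd):
--         # minimal number of hand balls to clear bd (None = impossible), memoized
--         if not bd:
--             return 0
--         key = (bd, tuple(hm.items()))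
--         if key in memo:
--             return memo[key]
--         best = None
--         for i, (c, d) in enumerate(bd):
--             if c in hm and hm[c] + d >= 3:
--                 need = 3 - d
--                 hm[c] -= need
--                 sub = solve(collapse(bd, i))
--                 hm[c] += need
--                 if sub is not None and (best is None or sub + need < best):
--                     best = sub + need
--         memo[key] = best
--         return best
--
--     ans = solve(runs)
--     return -1 if ans is None else ans
-- ===== Notes on version B (the rewrite author's own statement) =====
-- stated objective: alternative
-- what changed: B memoizes the search on the (board-runs, hand-counter) state so repeated configurations are solved once, computes runs with a direct indexed run-scan instead of A's last/d state-machine fold, replaces A's deepcopy-per-branch with mutate/undo of one counter, and replaces A's accumulator-plus-sentinel (p, 1<<32) arithmetic with a pure 'minimum extra balls or None' value.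
-- intended difference: On board = '' A returns -1 because its run-length loop fabricates an uncollapsible (None, 1) run, while B returns 0, the intended value (an empty board needs no balls); and on boards of at least 2^31 characters, where a genuine clearing cost can reach A's 1<<32 sentinel, A's min-tracking can misreport a clearable board as -1, while B, which tracks impossibility as None rather than as a finite sentinel, returns the true minimum. — e.g. on findMinStep("", "R"): A returns -1, B returns 0
import Mathlib
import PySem

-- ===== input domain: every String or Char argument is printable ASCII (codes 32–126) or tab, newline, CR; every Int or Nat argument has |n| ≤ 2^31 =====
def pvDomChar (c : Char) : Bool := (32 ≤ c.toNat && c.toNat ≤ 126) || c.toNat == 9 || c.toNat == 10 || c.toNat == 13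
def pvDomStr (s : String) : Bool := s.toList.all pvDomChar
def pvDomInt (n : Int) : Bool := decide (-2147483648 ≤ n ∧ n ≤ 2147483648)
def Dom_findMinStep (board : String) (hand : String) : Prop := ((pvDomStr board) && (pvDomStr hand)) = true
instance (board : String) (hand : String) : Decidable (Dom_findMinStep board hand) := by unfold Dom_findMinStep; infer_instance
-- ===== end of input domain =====

-- B re-implements A's Zuma search with memoization on (board runs, hand counter) and without
-- deepcopy (mutate/undo); equivalence of the RETURN values is proved outside D_ (empty board,
-- and boards so long that A's 1<<32 sentinel collides with genuine clearing costs).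

-- ===== SHARED HELPERS (identical steps in both Pythons) =====

-- maxint = 1 << 32
def pvMaxint : Int := 4294967296

-- both Pythons build the hand counter with the identical loop 'for h in hand: hm[h] = hm.get(h, 0) + 1'
def pvHand (hand : List Char) : PySem.Dict Char Int :=
  hand.foldl (fun m h => m.insert h (m.getD h 0 + 1)) PySem.Dict.empty

-- the while-loop condition: si >= 0 and sj < len(bd) and bd[si][0] == bd[sj][0] and bd[si][1] + bd[sj][1] >= 3
def pvExpandCond {α : Type} [DecidableEq α] (bd : List (α × Int)) (si sj : Int) : Bool :=
  if 0 ≤ si ∧ sj < (bd.length : Int) then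
    match PySem.List.pyGet? bd si, PySem.List.pyGet? bd sj with
    | some a, some b => decide (a.1 = b.1 ∧ 3 ≤ a.2 + b.2)
    | _, _ => false
  else false

-- the while loop 'while …: si -= 1; sj += 1' (fuel ≥ iterations; exact for the fuel the ports pass)
def pvExpand {α : Type} [DecidableEq α] (bd : List (α × Int)) : Nat → Int → Int → Int × Int
  | 0, si, sj => (si, sj)
  | fuel + 1, si, sj =>
      if pvExpandCond bd si sj then pvExpand bd fuel (si - 1) (sj + 1) else (si, sj)

-- the merge test: si >= 0 and sj < len(bd) and bd[si][0] == bd[sj][0]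
def pvMergeCond {α : Type} [DecidableEq α] (bd : List (α × Int)) (si sj : Int) : Bool :=
  if 0 ≤ si ∧ sj < (bd.length : Int) then
    match PySem.List.pyGet? bd si, PySem.List.pyGet? bd sj with
    | some a, some b => decide (a.1 = b.1)
    | _, _ => false
  else false

-- the 'remain' computation of A's dfs, which Source B extracts verbatim as its 'collapse' helper
def pvCollapse {α : Type} [DecidableEq α] (bd : List (α × Int)) (i : Int) : List (α × Int) :=
  let sp := pvExpand bd (i.toNat + 1) (i - 1) (i + 1)
  let si := sp.1
  let sj := sp.2
  if pvMergeCond bd si sj then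
    match PySem.List.pyGet? bd si, PySem.List.pyGet? bd sj with
    | some a, some b =>
        PySem.List.slice bd none (some si) ++ [(a.1, a.2 + b.2)]
          ++ PySem.List.slice bd (some (sj + 1)) none
    | _, _ =>
        PySem.List.slice bd none (some (max (si + 1) 0)) ++ PySem.List.slice bd (some sj) none
  else
    PySem.List.slice bd none (some (max (si + 1) 0)) ++ PySem.List.slice bd (some sj) none

-- ===== PORT A =====

-- the run-length loop of A: state (boardlist, last, d), then boardlist.append((last, d))
def pvStepA (s : List (Option Char × Int) × Option Char × Int) (x : Char) :
    List (Option Char × Int) × Option Char × Int :=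
  match s.2.1 with
  | none => (s.1, some x, s.2.2)
  | some l => if l = x then (s.1, some l, s.2.2 + 1) else (s.1 ++ [(some l, s.2.2)], some x, 1)

def pvRunsA (cs : List Char) : List (Option Char × Int) :=
  let st := cs.foldl pvStepA ([], none, 1)
  st.1 ++ [(st.2.1, st.2.2)]

-- A's dfs; 'for i, w in enumerate(bd)' is a fold over enumerate; fuel > len(bd) suffices since
-- each recursive call shortens bd (the dead first assignment to 'remain' in A is skipped)
def pvDfsA : Nat → List (Option Char × Int) → PySem.Dict Char Int → Int → Int
  | 0, _, _, p => p
  | fuel + 1, bd, hm, p =>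
      if bd = [] then p
      else
        (PySem.List.enumerate bd 0).foldl
          (fun minx iw =>
            match iw.2.1 with
            | none => minx        -- 'w[0] in hm' is False for None: hm's keys are hand characters
            | some c =>
              if hm.contains c ∧ 3 ≤ hm.getD c 0 + iw.2.2 then
                let remain := pvCollapse bd iw.1
                let chm := hm.insert c (hm.getD c 0 - (3 - iw.2.2))
                let res := pvDfsA fuel remain chm (p + 3 - iw.2.2)
                if res < minx then res else minx
              else minx)
          pvMaxint

def findMinStep (board : String) (hand : String) : Int :=
  let hm := pvHand hand.toList
  let boardlist := pvRunsA board.toList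
  let ans := pvDfsA (boardlist.length + 1) boardlist hm 0
  if ans = pvMaxint then -1 else ans

-- ===== PORT B =====

-- runs via an indexed run-scan: (c, length of maximal block) (fuel ≥ number of groups)
def pvRuns : Nat → List Char → List (Char × Int)
  | 0, _ => []
  | _, [] => []
  | fuel + 1, c :: rest =>
      (c, ((rest.takeWhile (· = c)).length : Int) + 1) :: pvRuns fuel (rest.dropWhile (· = c))

-- 'if sub is not None and (best is None or sub + need < best): best = sub + need'
def pvBetter (need : Int) (sub best : Option Int) : Option Int :=
  match sub, best with
  | some s, none => some (s + need)
  | some s, some b => if s + need < b then some (s + need) else some b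
  | none, b => b

-- B's memoized solve: the memo dict and the running 'best' are the fold state; the
-- mutate/undo of hm in Source B becomes passing the updated dict only to the recursive call
def pvSolveB : Nat → List (Char × Int) → PySem.Dict Char Int →
    PySem.Dict (List (Char × Int) × List (Char × Int)) (Option Int) →
    Option Int × PySem.Dict (List (Char × Int) × List (Char × Int)) (Option Int)
  | 0, _, _, memo => (none, memo)
  | fuel + 1, bd, hm, memo =>
      if bd = [] then (some 0, memo)
      else
        let key := (bd, hm.items)
        match memo.get? key with
        | some v => (v, memo)
        | none =>
            let r :=
              (PySem.List.enumerate bd 0).foldl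
                (fun (acc : Option Int ×
                    PySem.Dict (List (Char × Int) × List (Char × Int)) (Option Int)) iw =>
                  let c := iw.2.1
                  let d := iw.2.2
                  if hm.contains c ∧ 3 ≤ hm.getD c 0 + d then
                    let need := 3 - d
                    let s := pvSolveB fuel (pvCollapse bd iw.1)
                        (hm.insert c (hm.getD c 0 - need)) acc.2
                    (pvBetter need s.1 acc.1, s.2)
                  else acc)
                (none, memo)
            (r.1, r.2.insert key r.1)

def findMinStep_alt (board : String) (hand : String) : Int :=
  let hm := pvHand hand.toList
  let runs := pvRuns board.toList.length board.toList
  match (pvSolveB (runs.length + 1) runs hm PySem.Dict.empty).1 with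
  | none => -1
  | some v => v

-- ===== PRECONDITION & SPEC =====

-- On the empty board A returns -1 (its run-length loop fabricates an uncollapsible (None, 1) run)
-- while B returns 0, the intended answer; and on boards of at least 2^31 characters a genuine
-- clearing cost can reach A's 1 << 32 sentinel, which A's min-tracking then misreports as -1,
-- while B (tracking 'impossible' as None, not a finite sentinel) reports the true cost.
def D_findMinStep (board : String) (hand : String) : Prop :=
  board = "" ∨ (2147483648 : Int) ≤ (board.toList.length : Int)
instance (board : String) (hand : String) : Decidable (D_findMinStep board hand) := by
  unfold D_findMinStep; infer_instance

def Spec_findMinStep (board : String) (hand : String) (out : Int) : Prop :=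
  ¬ D_findMinStep board hand → out = findMinStep_alt board hand
instance (board : String) (hand : String) (out : Int) : Decidable (Spec_findMinStep board hand out) := by
  unfold Spec_findMinStep; infer_instance

def pvDiffWitness_findMinStep : String × String := ("", "R")
def pvDiffWitnessOut_findMinStep : Int × Int := (-1, 0)

-- ===== CLAIM (what is proved, stated in full; the proofs are below) =====
def Claim_unchanged_findMinStep : Prop := ∀ (board : String) (hand : String), Dom_findMinStep board hand → Spec_findMinStep board hand (findMinStep board hand)
def Claim_changed_findMinStep : Prop := Dom_findMinStep (pvDiffWitness_findMinStep.1) (pvDiffWitness_findMinStep.2) ∧ D_findMinStep (pvDiffWitness_findMinStep.1) (pvDiffWitness_findMinStep.2) ∧ findMinStep (pvDiffWitness_findMinStep.1) (pvDiffWitness_findMinStep.2) = pvDiffWitnessOut_findMinStep.1 ∧ findMinStep_alt (pvDiffWitness_findMinStep.1) (pvDiffWitness_findMinStep.2) = pvDiffWitnessOut_findMinStep.2 ∧ pvDiffWitnessOut_findMinStep.1 ≠ pvDiffWitnessOut_findMinStep.2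

-- ===== LEMMAS AND PROOFS =====

def pvSig (p : Char × Int) : Option Char × Int := (some p.1, p.2)
lemma pvPyGet?_map {α β : Type} (f : α → β) (l : List α) (i : Int) :
    PySem.List.pyGet? (l.map f) i = (PySem.List.pyGet? l i).map f := by
  simp [PySem.List.pyGet?]
lemma pvSlice_map {α β : Type} (f : α → β) (l : List α) (a? b? : Option Int) :
    PySem.List.slice (l.map f) a? b? = (PySem.List.slice l a? b?).map f := by
  simp [PySem.List.slice]
lemma pvMergeCond_map (bd : List (Char × Int)) (si sj : Int) :
    pvMergeCond (bd.map pvSig) si sj = pvMergeCond bd si sj := by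
  unfold pvMergeCond
  rw [List.length_map, pvPyGet?_map, pvPyGet?_map]
  cases PySem.List.pyGet? bd si <;> cases PySem.List.pyGet? bd sj <;> simp [pvSig]
lemma pvPyGet?_mem {α : Type} (l : List α) (i : Int) (a : α)
    (h : PySem.List.pyGet? l i = some a) : a ∈ l := by
  unfold PySem.List.pyGet? at h
  cases hk : PySem.List.pyIdx? l.length i with
  | none => rw [hk] at h; simp at h
  | some k => rw [hk] at h; simp at h; exact List.mem_of_getElem? h

lemma pvExpandCond_map (bd : List (Char × Int)) (si sj : Int) :
    pvExpandCond (bd.map pvSig) si sj = pvExpandCond bd si sj := by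
  unfold pvExpandCond
  rw [List.length_map, pvPyGet?_map, pvPyGet?_map]
  cases PySem.List.pyGet? bd si <;> cases PySem.List.pyGet? bd sj <;> simp [pvSig]
lemma pvExpand_map (bd : List (Char × Int)) (fuel : Nat) (si sj : Int) :
    pvExpand (bd.map pvSig) fuel si sj = pvExpand bd fuel si sj := by
  induction fuel generalizing si sj with
  | zero => rfl
  | succ f ih => simp only [pvExpand, pvExpandCond_map]; split <;> simp [ih]

lemma pvCollapse_map (bd : List (Char × Int)) (i : Int) :
    pvCollapse (bd.map pvSig) i = (pvCollapse bd i).map pvSig := by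
  unfold pvCollapse
  rw [pvExpand_map]
  generalize pvExpand bd (i.toNat + 1) (i - 1) (i + 1) = sp
  obtain ⟨si, sj⟩ := sp
  simp only [pvMergeCond_map]
  split
  · rw [pvPyGet?_map, pvPyGet?_map]
    cases PySem.List.pyGet? bd si <;> cases PySem.List.pyGet? bd sj <;>
      simp [pvSig, pvSlice_map]
  · simp [pvSlice_map]

lemma pvExpand_bounds {α : Type} [DecidableEq α] (bd : List (α × Int)) (fuel : Nat) (si sj : Int) :
    (pvExpand bd fuel si sj).1 ≤ si ∧ sj ≤ (pvExpand bd fuel si sj).2 ∧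
      si - (pvExpand bd fuel si sj).1 = (pvExpand bd fuel si sj).2 - sj := by
  induction fuel generalizing si sj with
  | zero => simp [pvExpand]
  | succ f ih =>
    simp only [pvExpand]
    split
    · have := ih (si - 1) (sj + 1); omega
    · simp

-- general length facts for the two slice shapes used by pvCollapse
lemma pvLen_sliceTo {α : Type} (l : List α) (b : Int) (hb : 0 ≤ b) :
    (PySem.List.slice l none (some b)).length = min b.toNat l.length := by
  rw [PySem.List.slice_to l hb]; simp
lemma pvLen_sliceFrom {α : Type} (l : List α) (a : Int) (ha : 0 ≤ a) :
    (PySem.List.slice l (some a) none).length = l.length - a.toNat := by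
  rw [PySem.List.slice_from l ha]; simp

lemma pvCollapse_length_lt {α : Type} [DecidableEq α] (bd : List (α × Int)) (i : Int)
    (h0 : 0 ≤ i) (h1 : i < (bd.length : Int)) :
    (pvCollapse bd i).length < bd.length := by
  unfold pvCollapse
  have hb := pvExpand_bounds bd (i.toNat + 1) (i - 1) (i + 1)
  generalize hsp : pvExpand bd (i.toNat + 1) (i - 1) (i + 1) = sp at hb
  obtain ⟨si, sj⟩ := sp
  simp only at hb ⊢
  by_cases hm : pvMergeCond bd si sj = true
  · rw [if_pos hm]
    have hrange : 0 ≤ si ∧ sj < (bd.length : Int) := by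
      by_contra hc
      unfold pvMergeCond at hm; rw [if_neg hc] at hm; simp at hm
    cases hga : PySem.List.pyGet? bd si with
    | none =>
      simp only [hga, List.length_append, pvLen_sliceTo _ _ (by omega : (0:Int) ≤ max (si+1) 0),
        pvLen_sliceFrom _ _ (by omega : (0:Int) ≤ sj)]
      omega
    | some a =>
      cases hgb : PySem.List.pyGet? bd sj with
      | none =>
        simp only [hga, hgb, List.length_append, pvLen_sliceTo _ _ (by omega : (0:Int) ≤ max (si+1) 0),
          pvLen_sliceFrom _ _ (by omega : (0:Int) ≤ sj)]
        omega
      | some b =>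
        simp only [hga, hgb, List.length_append, List.length_cons, List.length_nil,
          pvLen_sliceTo _ _ (by omega : (0:Int) ≤ si),
          pvLen_sliceFrom _ _ (by omega : (0:Int) ≤ sj + 1)]
        omega
  · rw [if_neg hm]
    simp only [List.length_append, pvLen_sliceTo _ _ (by omega : (0:Int) ≤ max (si+1) 0),
      pvLen_sliceFrom _ _ (by omega : (0:Int) ≤ sj)]
    omega

-- ==== positivity of run lengths ====
def pvAllPos {α : Type} (bd : List (α × Int)) : Prop := ∀ w ∈ bd, 1 ≤ w.2

lemma pvCollapse_allPos {α : Type} [DecidableEq α] (bd : List (α × Int)) (i : Int)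
    (h : pvAllPos bd) : pvAllPos (pvCollapse bd i) := by
  unfold pvCollapse
  generalize pvExpand bd (i.toNat + 1) (i - 1) (i + 1) = sp
  obtain ⟨si, sj⟩ := sp
  simp only
  intro w hw
  split at hw
  · cases hga : PySem.List.pyGet? bd si with
    | none =>
      rw [hga] at hw
      rcases List.mem_append.1 hw with h1 | h1 <;>
        exact h w (PySem.List.mem_of_mem_slice _ _ _ h1)
    | some a =>
      cases hgb : PySem.List.pyGet? bd sj with
      | none =>
        rw [hga, hgb] at hw
        rcases List.mem_append.1 hw with h1 | h1 <;>
          exact h w (PySem.List.mem_of_mem_slice _ _ _ h1)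
      | some b =>
        rw [hga, hgb] at hw
        rcases List.mem_append.1 hw with h1 | h1
        · rcases List.mem_append.1 h1 with h2 | h2
          · exact h w (PySem.List.mem_of_mem_slice _ _ _ h2)
          · have ha := h a (pvPyGet?_mem _ _ _ hga)
            have hb := h b (pvPyGet?_mem _ _ _ hgb)
            simp at h2; subst h2; simp; omega
        · exact h w (PySem.List.mem_of_mem_slice _ _ _ h1)
  · rcases List.mem_append.1 hw with h1 | h1 <;>
      exact h w (PySem.List.mem_of_mem_slice _ _ _ h1)

-- ==== the pure (memo-free) value function that both ports compute ====
def pvG : Nat → List (Char × Int) → PySem.Dict Char Int → Option Int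
  | 0, _, _ => none
  | fuel + 1, bd, hm =>
      if bd = [] then some 0
      else
        (PySem.List.enumerate bd 0).foldl
          (fun best iw =>
            if hm.contains iw.2.1 ∧ 3 ≤ hm.getD iw.2.1 0 + iw.2.2 then
              pvBetter (3 - iw.2.2)
                (pvG fuel (pvCollapse bd iw.1)
                  (hm.insert iw.2.1 (hm.getD iw.2.1 0 - (3 - iw.2.2)))) best
            else best)
          none

-- named loop bodies (the lambdas inside pvG / pvDfsA / pvSolveB), with rfl unfolding equations
def pvGBody (fuel : Nat) (bd : List (Char × Int)) (hm : PySem.Dict Char Int)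
    (best : Option Int) (iw : Int × (Char × Int)) : Option Int :=
  if hm.contains iw.2.1 ∧ 3 ≤ hm.getD iw.2.1 0 + iw.2.2 then
    pvBetter (3 - iw.2.2)
      (pvG fuel (pvCollapse bd iw.1) (hm.insert iw.2.1 (hm.getD iw.2.1 0 - (3 - iw.2.2)))) best
  else best

lemma pvG_succ (fuel : Nat) (bd : List (Char × Int)) (hm : PySem.Dict Char Int) :
    pvG (fuel + 1) bd hm =
      if bd = [] then some 0
      else (PySem.List.enumerate bd 0).foldl (pvGBody fuel bd hm) none := rfl

def pvDfsBody (fuel : Nat) (bd : List (Option Char × Int)) (hm : PySem.Dict Char Int) (p : Int)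
    (minx : Int) (iw : Int × (Option Char × Int)) : Int :=
  match iw.2.1 with
  | none => minx
  | some c =>
    if hm.contains c ∧ 3 ≤ hm.getD c 0 + iw.2.2 then
      let remain := pvCollapse bd iw.1
      let chm := hm.insert c (hm.getD c 0 - (3 - iw.2.2))
      let res := pvDfsA fuel remain chm (p + 3 - iw.2.2)
      if res < minx then res else minx
    else minx

lemma pvDfsA_succ (fuel : Nat) (bd : List (Option Char × Int)) (hm : PySem.Dict Char Int) (p : Int) :
    pvDfsA (fuel + 1) bd hm p =
      if bd = [] then p
      else (PySem.List.enumerate bd 0).foldl (pvDfsBody fuel bd hm p) pvMaxint := rfl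

-- ==== every enumerate element is an in-range index paired with its entry ====
lemma pvEnum_mem {α : Type} (bd : List α) (iw : Int × α) (h : iw ∈ PySem.List.enumerate bd 0) :
    ∃ (k : Nat) (hk : k < bd.length), iw = ((k : Int), bd[k]) := by
  rcases (PySem.List.mem_enumerate_iff bd 0 iw).1 h with ⟨k, hk, hp⟩
  exact ⟨k, hk, by simpa using hp⟩

-- ==== the value of pvG is at most 2·|bd| ====
lemma pvG_bound : ∀ fuel bd hm v, pvAllPos bd → pvG fuel bd hm = some v →
    v ≤ 2 * (bd.length : Int) := by
  intro fuel
  induction fuel with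
  | zero => intro bd hm v _ h; simp [pvG] at h
  | succ f ih =>
    intro bd hm v hpos hG
    rw [pvG_succ] at hG
    by_cases hbd : bd = []
    · rw [if_pos hbd] at hG; simp at hG; simp [hbd]; omega
    rw [if_neg hbd] at hG
    -- fold invariant
    suffices haux : ∀ (l : List (Int × (Char × Int))) (best : Option Int),
        (∀ iw ∈ l, ∃ (k : Nat) (hk : k < bd.length), iw = ((k : Int), bd[k])) →
        (∀ b, best = some b → b ≤ 2 * (bd.length : Int)) →
        ∀ v, l.foldl (pvGBody f bd hm) best = some v → v ≤ 2 * (bd.length : Int) by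
      exact haux _ none (fun iw h => pvEnum_mem bd iw h) (by simp) v hG
    intro l
    induction l with
    | nil => intro best _ hb v hv; exact hb v hv
    | cons iw rest ihl =>
      intro best hmem hb v hv
      simp only [List.foldl_cons] at hv
      refine ihl _ (fun x hx => hmem x (List.mem_cons_of_mem _ hx)) ?_ v hv
      intro b hb'
      rcases hmem iw (List.mem_cons_self) with ⟨k, hk, hiw⟩
      subst hiw
      unfold pvGBody at hb'
      split at hb'
      · -- candidate considered
        have hd : 1 ≤ (bd[k]).2 := hpos _ (List.getElem_mem hk)
        cases hsub : pvG f (pvCollapse bd (k : Int))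
            (hm.insert (bd[k]).1 (hm.getD (bd[k]).1 0 - (3 - (bd[k]).2))) with
        | none => rw [hsub] at hb'; simp [pvBetter] at hb'
                  exact hb b (by cases best <;> simp_all [pvBetter])
        | some s =>
          have hlen : (pvCollapse bd (k : Int)).length < bd.length :=
            pvCollapse_length_lt bd _ (by omega) (by exact_mod_cast hk)
          have hs : s ≤ 2 * ((pvCollapse bd (k : Int)).length : Int) :=
            ih _ _ _ (pvCollapse_allPos bd _ hpos) hsub
          rw [hsub] at hb'
          cases best with
          | none => simp [pvBetter] at hb'; omega
          | some b0 =>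
            have hb0 := hb b0 rfl
            simp only [pvBetter] at hb'
            split at hb' <;> simp at hb' <;> omega
      · exact hb b hb'

-- ==== A's dfs equals sentinel/offset view of pvG ====
def pvOptVal (p : Int) : Option Int → Int
  | none => pvMaxint
  | some v => p + v

lemma pvEnumerate_map {α β : Type} (l : List α) (f : α → β) (s : Int) :
    PySem.List.enumerate (l.map f) s = (PySem.List.enumerate l s).map (fun p => (p.1, f p.2)) := by
  induction l generalizing s <;> simp_all [PySem.List.enumerate_nil, PySem.List.enumerate_cons]

lemma pvDfsA_eq : ∀ fuel gfuel bd hm p, bd.length < fuel → bd.length < gfuel →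
    pvAllPos bd → p + 2 * (bd.length : Int) < pvMaxint →
    pvDfsA fuel (bd.map pvSig) hm p = pvOptVal p (pvG gfuel bd hm) := by
  intro fuel
  induction fuel with
  | zero => intro g bd hm p h; omega
  | succ f ih =>
    intro gfuel bd hm p hf hg hpos hp
    cases gfuel with
    | zero => omega
    | succ g =>
      rw [pvDfsA_succ, pvG_succ]
      by_cases hbd : bd = []
      · subst hbd; simp [pvOptVal]
      · rw [if_neg (by simpa using hbd), if_neg hbd]
        rw [pvEnumerate_map, List.foldl_map]
        -- fold correspondence
        suffices haux : ∀ (l : List (Int × (Char × Int))) (best : Option Int),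
            (∀ iw ∈ l, ∃ (k : Nat) (hk : k < bd.length), iw = ((k : Int), bd[k])) →
            (∀ b, best = some b → b ≤ 2 * (bd.length : Int)) →
            l.foldl (fun minx p' => pvDfsBody f (bd.map pvSig) hm p minx (p'.1, pvSig p'.2))
              (pvOptVal p best) =
            pvOptVal p (l.foldl (pvGBody g bd hm) best) by
          have := haux (PySem.List.enumerate bd 0) none
            (fun iw h => pvEnum_mem bd iw h) (by simp)
          simpa [pvOptVal] using this
        intro l
        induction l with
        | nil => intro best _ _; rfl
        | cons iw rest ihl =>
          intro best hmem hb
          simp only [List.foldl_cons]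
          rcases hmem iw (List.mem_cons_self) with ⟨k, hk, hiw⟩
          subst hiw
          have hd : 1 ≤ (bd[k]).2 := hpos _ (List.getElem_mem hk)
          have hstep : pvDfsBody f (bd.map pvSig) hm p (pvOptVal p best)
                ((k : Int), pvSig bd[k]) =
              pvOptVal p (pvGBody g bd hm best ((k : Int), bd[k])) := by
            unfold pvDfsBody pvGBody pvSig
            simp only
            by_cases hguard : hm.contains (bd[k]).1 ∧ 3 ≤ hm.getD (bd[k]).1 0 + (bd[k]).2
            · rw [if_pos hguard, if_pos hguard]
              have hclen : (pvCollapse bd (k : Int)).length < bd.length :=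
                pvCollapse_length_lt bd _ (by omega) (by exact_mod_cast hk)
              have hcm : pvCollapse (bd.map pvSig) (k : Int) =
                  (pvCollapse bd (k : Int)).map pvSig := pvCollapse_map bd _
              unfold pvSig at hcm
              rw [hcm]
              have hrec := ih g (pvCollapse bd (k : Int))
                (hm.insert (bd[k]).1 (hm.getD (bd[k]).1 0 - (3 - (bd[k]).2)))
                (p + 3 - (bd[k]).2) (by omega) (by omega)
                (pvCollapse_allPos bd _ hpos) (by push_cast; omega)
              unfold pvSig at hrec
              rw [hrec]
              cases hsub : pvG g (pvCollapse bd (k : Int))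
                  (hm.insert (bd[k]).1 (hm.getD (bd[k]).1 0 - (3 - (bd[k]).2))) with
              | none =>
                simp only [pvOptVal, pvBetter]
                cases hbest : best with
                | none => simp [pvOptVal]
                | some b0 =>
                  have h1 := hb b0 hbest
                  have h2 : ¬ (pvMaxint < p + b0) := by omega
                  simp [if_neg h2]
              | some s =>
                have hs : s ≤ 2 * ((pvCollapse bd (k : Int)).length : Int) :=
                  pvG_bound g _ _ _ (pvCollapse_allPos bd _ hpos) hsub
                cases hbest : best with
                | none =>
                  have hlt : p + 3 - (bd[k]).2 + s < pvMaxint := by push_cast at *; omega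
                  simp only [pvOptVal, pvBetter]
                  rw [if_pos hlt]
                  omega
                | some b0 =>
                  simp only [pvOptVal, pvBetter]
                  by_cases hcmp : s + (3 - (bd[k]).2) < b0
                  · rw [if_pos (by omega : p + 3 - (bd[k]).2 + s < p + b0), if_pos hcmp]
                    simp [pvOptVal]; omega
                  · rw [if_neg (by omega : ¬ (p + 3 - (bd[k]).2 + s < p + b0)), if_neg hcmp]
            · rw [if_neg hguard, if_neg hguard]
          rw [hstep]
          refine ihl _ (fun x hx => hmem x (List.mem_cons_of_mem _ hx)) ?_
          intro b hb'
          unfold pvGBody at hb'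
          split at hb'
          · cases hsub : pvG g (pvCollapse bd (k : Int))
                (hm.insert (bd[k]).1 (hm.getD (bd[k]).1 0 - (3 - (bd[k]).2))) with
            | none => rw [hsub] at hb'; exact hb b (by cases best <;> simp_all [pvBetter])
            | some s =>
              have hclen : (pvCollapse bd (k : Int)).length < bd.length :=
                pvCollapse_length_lt bd _ (by omega) (by exact_mod_cast hk)
              have hs : s ≤ 2 * ((pvCollapse bd (k : Int)).length : Int) :=
                pvG_bound g _ _ _ (pvCollapse_allPos bd _ hpos) hsub
              rw [hsub] at hb'
              cases best with
              | none => simp [pvBetter] at hb'; omega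
              | some b0 =>
                have hb0 := hb b0 rfl
                simp only [pvBetter] at hb'
                split at hb' <;> simp at hb' <;> omega
          · exact hb b hb'

-- ==== pvG does not depend on the fuel once it exceeds |bd| ====
lemma pvG_fuel_congr : ∀ f g bd hm, bd.length < f → bd.length < g →
    pvG f bd hm = pvG g bd hm := by
  intro f
  induction f with
  | zero => intro g bd hm h; omega
  | succ f ih =>
    intro g bd hm hf hg
    cases g with
    | zero => omega
    | succ g =>
      rw [pvG_succ, pvG_succ]
      by_cases hbd : bd = []
      · simp [hbd]
      · rw [if_neg hbd, if_neg hbd]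
        apply PySem.List.foldl_congr_mem
        intro best iw hmem
        rcases pvEnum_mem bd iw hmem with ⟨k, hk, hiw⟩
        subst hiw
        unfold pvGBody
        have hclen : (pvCollapse bd (k : Int)).length < bd.length :=
          pvCollapse_length_lt bd _ (by omega) (by exact_mod_cast hk)
        rw [ih g (pvCollapse bd (k : Int)) _ (by omega) (by omega)]

-- ==== memoisation soundness: pvSolveB computes pvG and keeps only correct entries ====
def pvInv (memo : PySem.Dict (List (Char × Int) × List (Char × Int)) (Option Int)) : Prop :=
  ∀ k v, memo.get? k = some v → v = pvG (k.1.length + 1) k.1 (PySem.Dict.mk k.2)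

def pvSolveBody (fuel : Nat) (bd : List (Char × Int)) (hm : PySem.Dict Char Int)
    (acc : Option Int × PySem.Dict (List (Char × Int) × List (Char × Int)) (Option Int))
    (iw : Int × (Char × Int)) :
    Option Int × PySem.Dict (List (Char × Int) × List (Char × Int)) (Option Int) :=
  if hm.contains iw.2.1 ∧ 3 ≤ hm.getD iw.2.1 0 + iw.2.2 then
    let need := 3 - iw.2.2
    let s := pvSolveB fuel (pvCollapse bd iw.1) (hm.insert iw.2.1 (hm.getD iw.2.1 0 - need)) acc.2
    (pvBetter need s.1 acc.1, s.2)
  else acc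

lemma pvSolveB_succ (fuel : Nat) (bd : List (Char × Int)) (hm : PySem.Dict Char Int)
    (memo : PySem.Dict (List (Char × Int) × List (Char × Int)) (Option Int)) :
    pvSolveB (fuel + 1) bd hm memo =
      if bd = [] then (some 0, memo)
      else
        match memo.get? (bd, hm.items) with
        | some v => (v, memo)
        | none =>
            let r := (PySem.List.enumerate bd 0).foldl (pvSolveBody fuel bd hm) (none, memo)
            (r.1, r.2.insert (bd, hm.items) r.1) := rfl

lemma pvSolveB_eq : ∀ fuel bd hm memo, bd.length < fuel → pvInv memo →
    (pvSolveB fuel bd hm memo).1 = pvG fuel bd hm ∧ pvInv (pvSolveB fuel bd hm memo).2 := by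
  intro fuel
  induction fuel with
  | zero => intro bd hm memo h; omega
  | succ f ih =>
    intro bd hm memo hlen hinv
    rw [pvSolveB_succ, pvG_succ]
    by_cases hbd : bd = []
    · rw [if_pos hbd, if_pos hbd]; exact ⟨rfl, hinv⟩
    rw [if_neg hbd, if_neg hbd]
    cases hhit : memo.get? (bd, hm.items) with
    | some v =>
      refine ⟨?_, hinv⟩
      have := hinv _ _ hhit
      simp only at this
      rw [this]
      have : PySem.Dict.mk hm.items = hm := rfl
      rw [this]
      rw [pvG_fuel_congr (bd.length + 1) (f + 1) bd hm (by omega) (by omega), pvG_succ,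
        if_neg hbd]
    | none =>
      -- the fold preserves the invariant and computes the pvG fold
      suffices haux : ∀ (l : List (Int × (Char × Int)))
          (acc : Option Int × PySem.Dict (List (Char × Int) × List (Char × Int)) (Option Int)),
          (∀ iw ∈ l, ∃ (k : Nat) (hk : k < bd.length), iw = ((k : Int), bd[k])) →
          pvInv acc.2 →
          (l.foldl (pvSolveBody f bd hm) acc).1 = l.foldl (pvGBody f bd hm) acc.1 ∧
            pvInv (l.foldl (pvSolveBody f bd hm) acc).2 by
        obtain ⟨h1, h2⟩ := haux (PySem.List.enumerate bd 0) (none, memo)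
          (fun iw h => pvEnum_mem bd iw h) hinv
        constructor
        · simpa using h1
        · -- invariant after inserting the key
          intro k v hk
          by_cases hkey : k = (bd, hm.items)
          · subst hkey
            rw [PySem.Dict.get?_insert_self] at hk
            have hv : v = ((PySem.List.enumerate bd 0).foldl (pvSolveBody f bd hm) (none, memo)).1 := by
              simpa using hk.symm
            rw [hv, h1]
            simp only
            have : PySem.Dict.mk hm.items = hm := rfl
            rw [this]
            rw [pvG_fuel_congr (bd.length + 1) (f + 1) bd hm (by omega) (by omega), pvG_succ,
              if_neg hbd]
          · rw [PySem.Dict.get?_insert, if_neg hkey] at hk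
            exact h2 k v hk
      intro l
      induction l with
      | nil => intro acc _ hi; exact ⟨rfl, hi⟩
      | cons iw rest ihl =>
        intro acc hmem hi
        rcases hmem iw (List.mem_cons_self) with ⟨k, hk, hiw⟩
        subst hiw
        simp only [List.foldl_cons]
        have hclen : (pvCollapse bd (k : Int)).length < bd.length :=
          pvCollapse_length_lt bd _ (by omega) (by exact_mod_cast hk)
        have hstep : (pvSolveBody f bd hm acc ((k : Int), bd[k])).1 =
              pvGBody f bd hm acc.1 ((k : Int), bd[k]) ∧
            pvInv (pvSolveBody f bd hm acc ((k : Int), bd[k])).2 := by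
          unfold pvSolveBody pvGBody
          by_cases hguard : hm.contains (bd[k]).1 ∧ 3 ≤ hm.getD (bd[k]).1 0 + (bd[k]).2
          · rw [if_pos hguard, if_pos hguard]
            obtain ⟨hs1, hs2⟩ := ih (pvCollapse bd (k : Int))
              (hm.insert (bd[k]).1 (hm.getD (bd[k]).1 0 - (3 - (bd[k]).2))) acc.2
              (by omega) hi
            constructor
            · simp only
              rw [hs1, pvG_fuel_congr f (f + 1) _ _ (by omega) (by omega)]
            · exact hs2
          · rw [if_neg hguard, if_neg hguard]; exact ⟨rfl, hi⟩
        obtain ⟨ha, hb⟩ := hstep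
        obtain ⟨h1, h2⟩ := ihl (pvSolveBody f bd hm acc ((k : Int), bd[k]))
          (fun x hx => hmem x (List.mem_cons_of_mem _ hx)) hb
        exact ⟨by rw [h1, ha], h2⟩

-- ==== A's run-length fold equals B's run-scan runs (mapped through pvSig) on nonempty boards ====
def pvRunsFrom (c : Char) (d : Int) : List Char → List (Char × Int)
  | [] => [(c, d)]
  | x :: xs => if x = c then pvRunsFrom c (d + 1) xs else (c, d) :: pvRunsFrom x 1 xs

lemma pvRunsA_aux : ∀ (cs : List Char) (acc : List (Option Char × Int)) (c : Char) (d : Int),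
    (cs.foldl pvStepA (acc, some c, d)).1 ++
        [((cs.foldl pvStepA (acc, some c, d)).2.1, (cs.foldl pvStepA (acc, some c, d)).2.2)] =
      acc ++ (pvRunsFrom c d cs).map pvSig := by
  intro cs
  induction cs with
  | nil => intro acc c d; simp [pvRunsFrom, pvSig]
  | cons x xs ih =>
    intro acc c d
    by_cases hxc : c = x
    · subst hxc
      have hstep : pvStepA (acc, some c, d) c = (acc, some c, d + 1) := by
        unfold pvStepA; simp
      rw [List.foldl_cons, hstep, ih acc c (d + 1)]
      conv_rhs => rw [pvRunsFrom]
      rw [if_pos rfl]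
    · have hstep : pvStepA (acc, some c, d) x = (acc ++ [(some c, d)], some x, 1) := by
        unfold pvStepA; simp [hxc]
      rw [List.foldl_cons, hstep, ih (acc ++ [(some c, d)]) x 1]
      conv_rhs => rw [pvRunsFrom]
      rw [if_neg (fun h => hxc h.symm)]
      simp [pvSig]

lemma pvRunsFrom_eq : ∀ (cs : List Char) (c : Char) (d : Int) (fuel : Nat), cs.length ≤ fuel →
    pvRunsFrom c d cs =
      (c, d + ((cs.takeWhile (· = c)).length : Int)) :: pvRuns fuel (cs.dropWhile (· = c)) := by
  intro cs
  induction cs with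
  | nil =>
    intro c d fuel _
    cases fuel <;> simp [pvRunsFrom, pvRuns]
  | cons x xs ih =>
    intro c d fuel hfuel
    by_cases hxc : x = c
    · subst hxc
      rw [pvRunsFrom, if_pos rfl]
      rw [ih x (d + 1) fuel (by simp only [List.length_cons] at hfuel; omega)]
      simp only [List.takeWhile_cons, List.dropWhile_cons, decide_true, if_true,
        List.length_cons]
      simp only [List.cons.injEq, Prod.mk.injEq]
      simp
      push_cast
      omega
    · rw [pvRunsFrom, if_neg hxc]
      cases fuel with
      | zero => simp only [List.length_cons] at hfuel; omega
      | succ f =>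
        rw [ih x 1 f (by simp only [List.length_cons] at hfuel; omega)]
        have hd : (decide (x = c)) = false := by simp [hxc]
        simp only [List.takeWhile_cons, List.dropWhile_cons, hd, Bool.false_eq_true,
          if_false, List.length_nil, Nat.cast_zero, add_zero]
        rw [show pvRuns (f + 1) (x :: xs) = (x, ((xs.takeWhile (· = x)).length : Int) + 1)
              :: pvRuns f (xs.dropWhile (· = x)) from rfl]
        simp only [List.cons.injEq, Prod.mk.injEq]
        simp
        omega

lemma pvRuns_len : ∀ (fuel : Nat) (cs : List Char), (pvRuns fuel cs).length ≤ cs.length := by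
  intro fuel
  induction fuel with
  | zero => intro cs; simp [pvRuns]
  | succ f ih =>
    intro cs
    cases cs with
    | nil => simp [pvRuns]
    | cons x rest =>
      rw [show pvRuns (f + 1) (x :: rest) = (x, ((rest.takeWhile (· = x)).length : Int) + 1)
            :: pvRuns f (rest.dropWhile (· = x)) from rfl]
      have h1 := ih (rest.dropWhile (· = x))
      have h2 := List.length_dropWhile_le (fun x_1 => decide (x_1 = x)) rest
      simp only [List.length_cons]
      omega

lemma pvRuns_allPos : ∀ (fuel : Nat) (cs : List Char), pvAllPos (pvRuns fuel cs) := by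
  intro fuel
  induction fuel with
  | zero => intro cs w hw; simp [pvRuns] at hw
  | succ f ih =>
    intro cs w hw
    cases cs with
    | nil => simp [pvRuns] at hw
    | cons x rest =>
      rw [show pvRuns (f + 1) (x :: rest) = (x, ((rest.takeWhile (· = x)).length : Int) + 1)
            :: pvRuns f (rest.dropWhile (· = x)) from rfl] at hw
      rcases List.mem_cons.1 hw with h | h
      · subst h; dsimp only; omega
      · exact ih _ w h

lemma pvRunsA_eq (x : Char) (rest : List Char) :
    pvRunsA (x :: rest) = (pvRuns (x :: rest).length (x :: rest)).map pvSig := by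
  show (List.foldl pvStepA ([], none, 1) (x :: rest)).1 ++
      [((List.foldl pvStepA ([], none, 1) (x :: rest)).2.1,
        (List.foldl pvStepA ([], none, 1) (x :: rest)).2.2)] = _
  have h0 : pvStepA ([], none, 1) x = ([], some x, 1) := rfl
  rw [List.foldl_cons, h0, pvRunsA_aux rest [] x 1]
  rw [pvRunsFrom_eq rest x 1 rest.length (le_refl _)]
  rw [show pvRuns (x :: rest).length (x :: rest) =
        (x, ((rest.takeWhile (· = x)).length : Int) + 1)
          :: pvRuns rest.length (rest.dropWhile (· = x)) from rfl]
  simp only [List.nil_append, List.map_cons, pvSig, List.cons.injEq, Prod.mk.injEq]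
  simp
  omega

lemma pvInv_empty : pvInv PySem.Dict.empty := by
  intro k v h
  rw [PySem.Dict.get?_empty] at h
  cases h

-- ===== VERDICT (by name: the statement is the Claim_ definition above) =====
theorem findMinStep_spec : Claim_unchanged_findMinStep := by
  intro board hand hdom hnD
  rw [D_findMinStep] at hnD
  push_neg at hnD
  obtain ⟨hne', hlen⟩ := hnD
  have hne : board.toList ≠ [] := by
    rw [Ne, String.toList_eq_nil_iff]
    exact hne'
  have hpre' : 2 * (board.toList.length : Int) < 4294967296 := by omega
  cases hcs : board.toList with
  | nil => exact absurd hcs hne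
  | cons x rest =>
    simp only [findMinStep, findMinStep_alt, hcs]
    set hm := pvHand hand.toList with hhm
    set R := pvRuns (x :: rest).length (x :: rest) with hR
    have hRlen : R.length ≤ (x :: rest).length := pvRuns_len _ _
    have hRpos : pvAllPos R := pvRuns_allPos _ _
    rw [pvRunsA_eq x rest, ← hR]
    have hcast : ((x :: rest).length : Int) = (board.toList.length : Int) := by rw [hcs]
    have hbridge := pvDfsA_eq ((R.map pvSig).length + 1) (R.length + 1) R hm 0
      (by simp) (by omega) hRpos
      (by simp only [pvMaxint]; push_cast at *; omega)
    rw [hbridge]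
    have hsolve := pvSolveB_eq (R.length + 1) R hm PySem.Dict.empty (by omega) pvInv_empty
    rw [hsolve.1]
    cases hg : pvG (R.length + 1) R hm with
    | none => simp [pvOptVal]
    | some v =>
      have hv : v ≤ 2 * (R.length : Int) := pvG_bound _ _ _ _ hRpos hg
      have hvlt : v < pvMaxint := by simp only [pvMaxint]; push_cast at *; omega
      simp only [pvOptVal, zero_add]
      rw [if_neg (by omega)]

theorem findMinStep_changed : Claim_changed_findMinStep := by
  unfold Claim_changed_findMinStep
  decide
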